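-- pv_equiv track=rewrite | github.com/xiema/competitive | codeforces/old/temp/strpop.py | check
-- ===== SOURCE A (Python) =====
-- def check(s):
--     if len(s) == 0:
--         return True
--     i,j,c = 0,1,s[0]
--     while j < len(s):
--         if s[j] != c:
--             if j-i>1 and check(s[:i]+s[j:]):
--                 return True
--             i,c = j,s[j]
--         j+=1
--     else:
--         if j-i>1 and check(s[:i]):
--             return True
--     return False
-- ===== SOURCE B (Python) =====
-- # BFS over the set of reachable strings, level by level with deduplication,
-- # instead of A's recursive backtracking DFS.
-- def _succs(t):
--     out = set()
--     n = len(t)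
--     i = 0
--     while i < n:
--         j = i
--         while j < n and t[j] == t[i]:
--             j += 1
--         if j - i > 1:
--             out.add(t[:i] + t[j:])
--         i = j
--     return out
--
-- def check(s):
--     frontier = {s}
--     for _ in range(len(s) // 2 + 1):
--         if "" in frontier:
--             return True
--         nxt = set()
--         for t in frontier:
--             nxt |= _succs(t)
--         frontier = nxt
--     return False
-- ===== Notes on version B (the rewrite author's own statement) =====
-- stated objective: alternative
-- what changed: B does a breadth-first search over the SET of strings reachable by maximal-run removals — a frontier set expanded level by level (at most len(s)//2 + 1 levels), with set deduplication collapsing identical intermediate strings — instead of A's recursive backtracking depth-first search; it answers true exactly when the empty string appears in some frontier.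
import Mathlib
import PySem

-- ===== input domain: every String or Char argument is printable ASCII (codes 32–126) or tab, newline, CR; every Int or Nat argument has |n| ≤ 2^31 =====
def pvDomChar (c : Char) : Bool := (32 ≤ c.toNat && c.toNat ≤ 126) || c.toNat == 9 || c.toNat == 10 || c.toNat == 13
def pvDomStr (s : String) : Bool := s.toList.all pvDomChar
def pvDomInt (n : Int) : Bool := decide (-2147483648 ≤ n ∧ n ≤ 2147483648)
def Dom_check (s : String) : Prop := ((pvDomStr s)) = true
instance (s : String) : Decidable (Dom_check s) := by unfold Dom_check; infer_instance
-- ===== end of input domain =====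

-- B replaces A's recursive backtracking DFS by a breadth-first search over the SET of
-- reachable strings, level by level with deduplication; objective: alternative.

-- ===== PORT A =====
-- A's while loop over j with run start i and run char c; recursive calls are ported through a
-- fuel argument (fuel = length of the string; each recursive call is on a ≥2-shorter string,
-- so the fuel guard is never hit — it only makes the recursion structural).
def checkLoop (gA : List Char → Bool) (l : List Char) (c : Char) (i j : Nat) : Bool :=
  if _h : j < l.length then
    if l.getD j 'a' ≠ c then
      if decide (1 < j - i) && gA (l.take i ++ l.drop j) then true
      else checkLoop gA l (l.getD j 'a') j (j + 1)
    else checkLoop gA l c i (j + 1)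
  else decide (1 < j - i) && gA (l.take i)
termination_by l.length - j

def checkGo : Nat → List Char → Bool
  | _, [] => true
  | 0, _ :: _ => false
  | f + 1, c :: t => checkLoop (checkGo f) (c :: t) c 0 1

def check (s : String) : Bool := checkGo s.toList.length s.toList

-- ===== PORT B =====
-- Source B's inner 'while j < n and t[j] == t[i]: j += 1' loop
def runEndB (l : List Char) (ci : Char) (j : Nat) : Nat :=
  if j < l.length ∧ l.getD j 'a' = ci then runEndB l ci (j + 1) else j
termination_by l.length - j
decreasing_by omega

-- cited by succsLoop's decreasing_by
theorem runEndB_ge (l : List Char) (ci : Char) : ∀ j, j ≤ runEndB l ci j := by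
  intro j
  induction j using runEndB.induct (l := l) (ci := ci) with
  | case1 j h ih => rw [runEndB, if_pos h]; omega
  | case2 j h => rw [runEndB, if_neg h]

-- Source B's outer 'while i < n' loop of _succs, accumulating into the set 'out'
def succsLoop (l : List Char) (i : Nat) (out : PySem.Set (List Char)) : PySem.Set (List Char) :=
  if h : i < l.length then
    succsLoop l (runEndB l (l.getD i 'a') i)
      (if 1 < runEndB l (l.getD i 'a') i - i then
        PySem.Set.add out (l.take i ++ l.drop (runEndB l (l.getD i 'a') i)) else out)
  else out
termination_by l.length - i
decreasing_by
  have h1 : i + 1 ≤ runEndB l (l.getD i 'a') i := by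
    rw [runEndB, if_pos ⟨h, rfl⟩]; exact runEndB_ge l (l.getD i 'a') (i + 1)
  omega

def succsB (l : List Char) : PySem.Set (List Char) := succsLoop l 0 PySem.Set.empty

-- 'for t in frontier: nxt |= _succs(t)' starting from nxt = set()
def expandB (fr : PySem.Set (List Char)) : PySem.Set (List Char) :=
  fr.foldl (fun nxt t => PySem.Set.union nxt (succsB t)) PySem.Set.empty

-- 'for _ in range(len(s)//2 + 1): if "" in frontier: return True; frontier = nxt'
def bfsB : Nat → PySem.Set (List Char) → Bool
  | 0, _ => false
  | k + 1, fr => if [] ∈ fr then true else bfsB k (expandB fr)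

def check_alt (s : String) : Bool :=
  bfsB (s.toList.length / 2 + 1) (PySem.Set.ofList [s.toList])

-- ===== PRECONDITION & SPEC =====
def Spec_check (s : String) (out : Bool) : Prop := out = check_alt s
instance (s : String) (out : Bool) : Decidable (Spec_check s out) := by unfold Spec_check; infer_instance

-- ===== CLAIM (what is proved, stated in full; the proofs are below) =====
def Claim_equal_check : Prop := ∀ (s : String), Dom_check s → Spec_check s (check s)

-- ===== LEMMAS AND PROOFS =====

-- Candidate successors A's loop tries from state (c, i, j); proof-only specification.
def succsFrom (l : List Char) (c : Char) (i j : Nat) : List (List Char) :=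
  if _h : j < l.length then
    if l.getD j 'a' ≠ c then
      (if 1 < j - i then [l.take i ++ l.drop j] else []) ++ succsFrom l (l.getD j 'a') j (j + 1)
    else succsFrom l c i (j + 1)
  else if 1 < j - i then [l.take i] else []
termination_by l.length - j

-- all one-step successors of l (the single-removal results both programs search over)
def succsFromAt (l : List Char) (i : Nat) : List (List Char) :=
  if _h : i < l.length then succsFrom l (l.getD i 'a') i (i + 1) else []

-- '[] is reachable from a in exactly k maximal-run removals'
def StepN : Nat → List Char → List Char → Prop
  | 0, a, b => a = b
  | k + 1, a, b => ∃ c, c ∈ succsFromAt a 0 ∧ StepN k c b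

theorem checkLoop_eq_any (g : List Char → Bool) (l : List Char) :
    ∀ c i j, checkLoop g l c i j = (succsFrom l c i j).any g := by
  intro c i j
  induction c, i, j using succsFrom.induct (l := l) with
  | case1 c i j h hne ih =>
      rw [checkLoop, succsFrom, dif_pos h, dif_pos h, if_pos hne, if_pos hne, List.any_append, ih]
      cases hg : decide (1 < j - i) && g (l.take i ++ l.drop j) <;> simp_all
  | case2 c i j h hne ih =>
      rw [checkLoop, succsFrom, dif_pos h, dif_pos h, if_neg hne, if_neg hne, ih]
  | case3 c i j h h1 =>
      rw [checkLoop, succsFrom, dif_neg h, dif_neg h, if_pos h1]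
      simp [h1]
  | case4 c i j h h1 =>
      rw [checkLoop, succsFrom, dif_neg h, dif_neg h, if_neg h1]
      simp [h1]

theorem succsFrom_len (l : List Char) :
    ∀ c i j u, i < j → j ≤ l.length → u ∈ succsFrom l c i j → u.length + 2 ≤ l.length := by
  intro c i j
  induction c, i, j using succsFrom.induct (l := l) with
  | case1 c i j h hne ih =>
      intro u hij hjl hu
      rw [succsFrom, dif_pos h, if_pos hne] at hu
      rcases List.mem_append.mp hu with hu | hu
      · by_cases h1 : 1 < j - i
        · rw [if_pos h1] at hu
          simp only [List.mem_singleton] at hu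
          subst hu
          simp only [List.length_append, List.length_take, List.length_drop]
          omega
        · rw [if_neg h1] at hu; simp at hu
      · exact ih u (by omega) (by omega) hu
  | case2 c i j h hne ih =>
      intro u hij hjl hu
      rw [succsFrom, dif_pos h, if_neg hne] at hu
      exact ih u (by omega) (by omega) hu
  | case3 c i j h h1 =>
      intro u hij hjl hu
      rw [succsFrom, dif_neg h, if_pos h1] at hu
      simp only [List.mem_singleton] at hu
      subst hu
      simp only [List.length_take]
      omega
  | case4 c i j h h1 =>
      intro u hij hjl hu
      rw [succsFrom, dif_neg h, if_neg h1] at hu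
      simp at hu

theorem succsFromAt_len (l u : List Char) (hu : u ∈ succsFromAt l 0) :
    u.length + 2 ≤ l.length := by
  unfold succsFromAt at hu
  by_cases h : 0 < l.length
  · rw [dif_pos h] at hu
    exact succsFrom_len l (l.getD 0 'a') 0 1 u (by omega) (by omega) hu
  · rw [dif_neg h] at hu; simp at hu

theorem stepN_len : ∀ (k : Nat) (a : List Char), StepN k a [] → 2 * k ≤ a.length := by
  intro k
  induction k with
  | zero => intro a _; omega
  | succ k ih =>
      rintro a ⟨c, hc, hstep⟩
      have h1 := succsFromAt_len a c hc
      have h2 := ih c hstep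
      omega

theorem checkGo_iff : ∀ (fuel : Nat) (l : List Char), l.length ≤ fuel →
    (checkGo fuel l = true ↔ ∃ k, StepN k l []) := by
  intro fuel
  induction fuel with
  | zero =>
      intro l hl
      have h0 : l = [] := by cases l with | nil => rfl | cons a t => simp at hl
      subst h0
      exact ⟨fun _ => ⟨0, rfl⟩, fun _ => rfl⟩
  | succ f ih =>
      intro l hl
      cases l with
      | nil => exact ⟨fun _ => ⟨0, rfl⟩, fun _ => rfl⟩
      | cons c t =>
          have hA : checkGo (f + 1) (c :: t) = (succsFromAt (c :: t) 0).any (checkGo f) := by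
            show checkLoop (checkGo f) (c :: t) c 0 1 = _
            rw [checkLoop_eq_any]
            unfold succsFromAt
            rw [dif_pos (by simp)]
            rfl
          rw [hA, List.any_eq_true]
          constructor
          · rintro ⟨u, hu, hgu⟩
            have hlen := succsFromAt_len (c :: t) u hu
            have hlen' : u.length + 2 ≤ t.length + 1 := by simpa using hlen
            have hl' : t.length + 1 ≤ f + 1 := by simpa using hl
            have := (ih u (by omega)).mp hgu
            obtain ⟨k, hk⟩ := this
            exact ⟨k + 1, u, hu, hk⟩
          · rintro ⟨k, hk⟩
            cases k with
            | zero => simp [StepN] at hk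
            | succ k =>
                obtain ⟨u, hu, hstep⟩ := hk
                have hlen := succsFromAt_len (c :: t) u hu
                have hlen' : u.length + 2 ≤ t.length + 1 := by simpa using hlen
                have hl' : t.length + 1 ≤ f + 1 := by simpa using hl
                exact ⟨u, hu, (ih u (by omega)).mpr ⟨k, hstep⟩⟩

-- B side: membership in the set of one-step successors
theorem succsFrom_runEnd (l : List Char) (c : Char) (i : Nat) :
    ∀ j, succsFrom l c i (runEndB l c j) = succsFrom l c i j := by
  intro j
  induction j using runEndB.induct (l := l) (ci := c) with
  | case1 j h ih =>
      rw [runEndB, if_pos h, ih]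
      conv_rhs => rw [succsFrom]
      rw [dif_pos h.1, if_neg (not_not_intro h.2)]
  | case2 j h => rw [runEndB, if_neg h]

theorem runEndB_stop (l : List Char) (c : Char) :
    ∀ j, ¬ (runEndB l c j < l.length ∧ l.getD (runEndB l c j) 'a' = c) := by
  intro j
  induction j using runEndB.induct (l := l) (ci := c) with
  | case1 j h ih => rw [runEndB, if_pos h]; exact ih
  | case2 j h => rw [runEndB, if_neg h]; exact h

theorem succsFromAt_unroll (l : List Char) (i : Nat) (h : i < l.length) :
    succsFromAt l i =
      (if 1 < runEndB l (l.getD i 'a') i - i then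
        [l.take i ++ l.drop (runEndB l (l.getD i 'a') i)] else []) ++
      succsFromAt l (runEndB l (l.getD i 'a') i) := by
  have hi1 : runEndB l (l.getD i 'a') i = runEndB l (l.getD i 'a') (i + 1) := by
    rw [runEndB, if_pos ⟨h, rfl⟩]
  unfold succsFromAt
  rw [dif_pos h, ← succsFrom_runEnd l (l.getD i 'a') i (i + 1), ← hi1]
  have hstop := runEndB_stop l (l.getD i 'a') i
  rw [succsFrom]
  by_cases hr : runEndB l (l.getD i 'a') i < l.length
  · have hne : l.getD (runEndB l (l.getD i 'a') i) 'a' ≠ l.getD i 'a' := by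
      intro hEq; exact hstop ⟨hr, hEq⟩
    rw [dif_pos hr, if_pos hne, dif_pos hr]
  · rw [dif_neg hr, dif_neg hr]
    have hdrop : l.drop (runEndB l (l.getD i 'a') i) = [] :=
      List.drop_eq_nil_of_le (by omega)
    rw [hdrop]
    by_cases h1 : 1 < runEndB l (l.getD i 'a') i - i <;> simp

theorem mem_succsLoop (l u : List Char) :
    ∀ i (out : PySem.Set (List Char)),
      (u ∈ succsLoop l i out ↔ u ∈ out ∨ u ∈ succsFromAt l i) := by
  intro i out
  induction i, out using succsLoop.induct (l := l) with
  | case1 i out h ih =>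
      simp only [dite_eq_ite] at ih
      rw [succsLoop, dif_pos h, ih, succsFromAt_unroll l i h]
      by_cases h1 : 1 < runEndB l (l.getD i 'a') i - i
      · rw [if_pos h1, if_pos h1, PySem.Set.mem_add]
        simp only [List.mem_append, List.mem_singleton]
        tauto
      · rw [if_neg h1, if_neg h1]
        simp only [List.nil_append]
  | case2 i out h =>
      rw [succsLoop, dif_neg h]
      unfold succsFromAt
      rw [dif_neg h]
      simp

theorem mem_succsB (l u : List Char) : u ∈ succsB l ↔ u ∈ succsFromAt l 0 := by
  rw [succsB, mem_succsLoop]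
  simp [PySem.Set.empty]

theorem mem_expandB (fr : PySem.Set (List Char)) (u : List Char) :
    u ∈ expandB fr ↔ ∃ t ∈ fr, u ∈ succsFromAt t 0 := by
  unfold expandB
  have hgen : ∀ (xs : List (List Char)) (acc : PySem.Set (List Char)),
      (u ∈ xs.foldl (fun nxt t => PySem.Set.union nxt (succsB t)) acc ↔
        u ∈ acc ∨ ∃ t ∈ xs, u ∈ succsFromAt t 0) := by
    intro xs
    induction xs with
    | nil => intro acc; simp
    | cons x xs ih =>
        intro acc
        simp only [List.foldl_cons, ih, PySem.Set.mem_union, mem_succsB, List.mem_cons]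
        constructor
        · rintro (⟨h | h⟩ | ⟨t, ht, hu⟩)
          · exact Or.inl h
          · exact Or.inr ⟨x, Or.inl rfl, h⟩
          · exact Or.inr ⟨t, Or.inr ht, hu⟩
        · rintro (h | ⟨t, (rfl | ht), hu⟩)
          · exact Or.inl (Or.inl h)
          · exact Or.inl (Or.inr hu)
          · exact Or.inr ⟨t, ht, hu⟩
  rw [hgen]
  simp

theorem stepN_succ_back : ∀ (k : Nat) (a b : List Char),
    StepN (k + 1) a b ↔ ∃ c, StepN k a c ∧ b ∈ succsFromAt c 0 := by
  intro k
  induction k with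
  | zero =>
      intro a b
      constructor
      · rintro ⟨c, hc, rfl⟩; exact ⟨a, rfl, hc⟩
      · rintro ⟨c, rfl, hb⟩; exact ⟨b, hb, rfl⟩
  | succ k ih =>
      intro a b
      constructor
      · rintro ⟨c, hc, hstep⟩
        obtain ⟨d, hd, hb⟩ := (ih c b).mp hstep
        exact ⟨d, ⟨c, hc, hd⟩, hb⟩
      · rintro ⟨d, ⟨c, hc, hd⟩, hb⟩
        exact ⟨c, hc, (ih c b).mpr ⟨d, hd, hb⟩⟩

-- the j-th BFS frontier
def frN (l : List Char) : Nat → PySem.Set (List Char)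
  | 0 => PySem.Set.ofList [l]
  | j + 1 => expandB (frN l j)

theorem mem_frN (l : List Char) : ∀ (j : Nat) (u : List Char), u ∈ frN l j ↔ StepN j l u := by
  intro j
  induction j with
  | zero =>
      intro u
      show u ∈ PySem.Set.ofList [l] ↔ l = u
      rw [PySem.Set.mem_ofList]
      simp [eq_comm]
  | succ j ih =>
      intro u
      show u ∈ expandB (frN l j) ↔ _
      rw [mem_expandB, stepN_succ_back]
      constructor
      · rintro ⟨t, ht, hu⟩; exact ⟨t, (ih t).mp ht, hu⟩
      · rintro ⟨t, ht, hu⟩; exact ⟨t, (ih t).mpr ht, hu⟩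

theorem bfsB_iff (l : List Char) : ∀ (k m : Nat),
    (bfsB k (frN l m) = true ↔ ∃ j, j < k ∧ [] ∈ frN l (m + j)) := by
  intro k
  induction k with
  | zero => intro m; simp [bfsB]
  | succ k ih =>
      intro m
      show (if [] ∈ frN l m then true else bfsB k (expandB (frN l m))) = true ↔ _
      by_cases h : [] ∈ frN l m
      · rw [if_pos h]
        exact ⟨fun _ => ⟨0, by omega, by simpa using h⟩, fun _ => rfl⟩
      · rw [if_neg h]
        have : expandB (frN l m) = frN l (m + 1) := rfl
        rw [this, ih (m + 1)]
        constructor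
        · rintro ⟨j, hj, hm⟩
          exact ⟨j + 1, by omega, by rw [show m + (j + 1) = m + 1 + j by omega]; exact hm⟩
        · rintro ⟨j, hj, hm⟩
          cases j with
          | zero => exact absurd (by simpa using hm) h
          | succ j =>
              exact ⟨j, by omega, by rw [show m + 1 + j = m + (j + 1) by omega]; exact hm⟩

-- ===== VERDICT (by name: the statement is the Claim_ definition above) =====
theorem check_spec : Claim_equal_check := by
  intro s _
  unfold Spec_check check check_alt
  have hA := checkGo_iff s.toList.length s.toList le_rfl
  have hB : bfsB (s.toList.length / 2 + 1) (PySem.Set.ofList [s.toList]) = true ↔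
      ∃ j, j < s.toList.length / 2 + 1 ∧ [] ∈ frN s.toList j := by
    have := bfsB_iff s.toList (s.toList.length / 2 + 1) 0
    simpa using this
  have hiff : (∃ k, StepN k s.toList []) ↔
      ∃ j, j < s.toList.length / 2 + 1 ∧ [] ∈ frN s.toList j := by
    constructor
    · rintro ⟨k, hk⟩
      have hlen := stepN_len k s.toList hk
      exact ⟨k, by omega, (mem_frN s.toList k []).mpr hk⟩
    · rintro ⟨j, _, hj⟩
      exact ⟨j, (mem_frN s.toList j []).mp hj⟩
  rw [Bool.eq_iff_iff, hA, hB]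
  exact hiff
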